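-- pv_equiv track=rewrite | github.com/pastuszko28/Venom | scripts/update_sonar_new_code_group.py | _split_auto_section
-- ===== SOURCE A (Python) =====
-- AUTO_SECTION_HEADER = "# AUTO-ADDED by pre-commit (staged backend/test changes)"
--
-- def _split_auto_section(lines: list[str]) -> tuple[list[str], list[str]]:
--     header_idx = next(
--         (idx for idx, line in enumerate(lines) if line.strip() == AUTO_SECTION_HEADER),
--         None,
--     )
--     if header_idx is None:
--         return lines[:], []
--
--     head = lines[: header_idx + 1]
--     auto_entries: list[str] = []
--     idx = header_idx + 1
--     while idx < len(lines):
--         stripped = lines[idx].strip()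
--         if stripped.startswith("#"):
--             break
--         if stripped:
--             auto_entries.append(stripped)
--         idx += 1
--     tail = lines[idx:]
--     return head + tail, auto_entries
-- ===== SOURCE B (Python) =====
-- AUTO_SECTION_HEADER = "# AUTO-ADDED by pre-commit (staged backend/test changes)"
--
-- def _split_auto_section(lines: list[str]) -> tuple[list[str], list[str]]:
--     head: list[str] = []
--     tail: list[str] = []
--     auto_entries: list[str] = []
--     phase = 0  # 0 = before header, 1 = inside auto section, 2 = after
--     for line in lines:
--         if phase == 0:
--             head.append(line)
--             if line.strip() == AUTO_SECTION_HEADER: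
--                 phase = 1
--         elif phase == 1:
--             stripped = line.strip()
--             if stripped.startswith("#"):
--                 tail.append(line)
--                 phase = 2
--             elif stripped:
--                 auto_entries.append(stripped)
--         else:
--             tail.append(line)
--     if phase == 0:
--         return head, []
--     return head + tail, auto_entries
-- ===== Notes on version B (the rewrite author's own statement) =====
-- stated objective: alternative
-- what changed: Replaced the find-index + slicing + separate while-loop structure by a single left-to-right pass driven by a three-state phase flag that builds head, auto_entries and tail in one traversal.
import Mathlib
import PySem

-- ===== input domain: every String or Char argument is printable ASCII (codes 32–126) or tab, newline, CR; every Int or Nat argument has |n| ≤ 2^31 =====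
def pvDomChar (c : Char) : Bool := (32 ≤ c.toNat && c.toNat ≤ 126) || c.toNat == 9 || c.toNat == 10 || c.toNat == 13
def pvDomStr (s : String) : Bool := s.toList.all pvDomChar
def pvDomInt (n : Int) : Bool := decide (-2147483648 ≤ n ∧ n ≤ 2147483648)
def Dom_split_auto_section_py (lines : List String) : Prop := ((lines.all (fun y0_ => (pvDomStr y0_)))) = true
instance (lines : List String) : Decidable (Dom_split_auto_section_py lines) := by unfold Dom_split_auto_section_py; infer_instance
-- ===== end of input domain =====

-- B replaces A's find-index + slicing + while-loop decomposition by a single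
-- left-to-right pass with a three-state phase flag (alternative decomposition, same cost).

-- ===== PORT A =====
def pvAutoHeader : String := "# AUTO-ADDED by pre-commit (staged backend/test changes)"

-- next((idx for idx, line in enumerate(lines) if line.strip() == AUTO_SECTION_HEADER), None)
def pvFindHeader : List String → Nat → Option Nat
  | [], _ => none
  | l :: t, i => if PySem.Str.strip l = pvAutoHeader then some i else pvFindHeader t (i + 1)

-- the while-loop over indices header_idx+1 … len(lines)-1, transcribed as structural
-- recursion over the suffix lines[header_idx+1:]; returns (auto_entries, lines[idx:])
def pvAScan : List String → List String → List String × List String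
  | [], acc => (acc, [])
  | l :: t, acc =>
    let stripped := PySem.Str.strip l
    if PySem.Str.startswith stripped "#" then (acc, l :: t)
    else if stripped ≠ "" then pvAScan t (acc ++ [stripped])
    else pvAScan t acc

def split_auto_section_py (lines : List String) : List String × List String :=
  match pvFindHeader lines 0 with
  | none => (lines, [])
  | some i =>
    let head := lines.take (i + 1)      -- lines[: header_idx + 1] (nonnegative slice)
    let st := pvAScan (lines.drop (i + 1)) []   -- lines[header_idx + 1 :]
    (head ++ st.2, st.1)

-- ===== PORT B =====
-- one step of B's for-loop: state = (phase, head, auto_entries, tail)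
def pvBStep (st : Nat × List String × List String × List String) (line : String) :
    Nat × List String × List String × List String :=
  match st with
  | (0, h, a, t) =>
    if PySem.Str.strip line = pvAutoHeader then (1, h ++ [line], a, t)
    else (0, h ++ [line], a, t)
  | (1, h, a, t) =>
    let stripped := PySem.Str.strip line
    if PySem.Str.startswith stripped "#" then (2, h, a, t ++ [line])
    else if stripped ≠ "" then (1, h, a ++ [stripped], t)
    else (1, h, a, t)
  | (p, h, a, t) => (p, h, a, t ++ [line])

def split_auto_section_py_alt (lines : List String) : List String × List String :=
  let st := lines.foldl pvBStep (0, [], [], [])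
  if st.1 = 0 then (st.2.1, []) else (st.2.1 ++ st.2.2.2, st.2.2.1)

-- ===== PRECONDITION & SPEC =====
def Spec_split_auto_section_py (lines : List String) (out : List String × List String) : Prop := out = split_auto_section_py_alt lines
instance (lines : List String) (out : List String × List String) : Decidable (Spec_split_auto_section_py lines out) := by unfold Spec_split_auto_section_py; infer_instance

-- ===== CLAIM (what is proved, stated in full; the proofs are below) =====
def Claim_equal_split_auto_section_py : Prop := ∀ (lines : List String), Dom_split_auto_section_py lines → Spec_split_auto_section_py lines (split_auto_section_py lines)

-- ===== LEMMAS AND PROOFS =====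

-- phase 2 just appends every remaining line to tail
lemma pvFold2 (xs : List String) (h a t : List String) :
    xs.foldl pvBStep (2, h, a, t) = (2, h, a, t ++ xs) := by
  induction xs generalizing t with
  | nil => simp
  | cons x xs ih => simp [pvBStep, ih]

-- phase 1 computes exactly what pvAScan computes (head unchanged, phase leaves 0)
lemma pvFold1 (xs : List String) (h a : List String) :
    ∃ p, p ≠ 0 ∧
      xs.foldl pvBStep (1, h, a, []) = (p, h, (pvAScan xs a).1, (pvAScan xs a).2) := by
  induction xs generalizing a with
  | nil => exact ⟨1, by simp, by simp [pvAScan]⟩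
  | cons x xs ih =>
    simp only [List.foldl_cons, pvBStep, pvAScan, List.nil_append]
    split_ifs with hs he
    · exact ⟨2, by simp, by rw [pvFold2]; rfl⟩
    · exact ih (a ++ [PySem.Str.strip x])
    · exact ih a

-- the index search is translation-invariant
lemma pvFindHeader_shift (xs : List String) (i : Nat) :
    pvFindHeader xs (i + 1) = (pvFindHeader xs i).map (· + 1) := by
  induction xs generalizing i with
  | nil => simp [pvFindHeader]
  | cons x xs ih =>
    by_cases hx : PySem.Str.strip x = pvAutoHeader
    · simp [pvFindHeader, hx]
    · simp [pvFindHeader, hx, ih]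

-- B's run from phase 0 with head prefix hd computes hd ++ A's result
lemma pvKey (xs : List String) (hd : List String) :
    (if (xs.foldl pvBStep (0, hd, [], [])).1 = 0
       then ((xs.foldl pvBStep (0, hd, [], [])).2.1, ([] : List String))
       else ((xs.foldl pvBStep (0, hd, [], [])).2.1 ++ (xs.foldl pvBStep (0, hd, [], [])).2.2.2,
             (xs.foldl pvBStep (0, hd, [], [])).2.2.1))
      = (hd ++ (split_auto_section_py xs).1, (split_auto_section_py xs).2) := by
  induction xs generalizing hd with
  | nil => simp [split_auto_section_py, pvFindHeader]
  | cons x xs ih =>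
    by_cases hx : PySem.Str.strip x = pvAutoHeader
    · -- header found at this line: B switches to phase 1, A slices here
      obtain ⟨p, hp, heq⟩ := pvFold1 xs (hd ++ [x]) []
      simp only [List.foldl_cons, pvBStep, if_pos hx]
      rw [heq]
      simp [hp, split_auto_section_py, pvFindHeader, hx]
    · -- not the header: B stays in phase 0 with head hd ++ [x]
      simp only [List.foldl_cons, pvBStep, if_neg hx]
      rw [ih (hd ++ [x])]
      rcases hfind : pvFindHeader xs 0 with _ | i
      · simp [split_auto_section_py, pvFindHeader, hx, pvFindHeader_shift, hfind]
      · simp [split_auto_section_py, pvFindHeader, hx, pvFindHeader_shift, hfind,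
              List.take_succ_cons, List.drop_succ_cons]

-- ===== VERDICT (by name: the statement is the Claim_ definition above) =====
theorem split_auto_section_py_spec : Claim_equal_split_auto_section_py := by
  intro lines _
  unfold Spec_split_auto_section_py split_auto_section_py_alt
  have h := pvKey lines []
  simp only [List.nil_append] at h
  simp only []
  rw [h]
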